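-- pv_equiv track=rewrite | github.com/PruthviP7/Programming-Hands-on | pp/Problems on numbers/30FNFDifference.py | NonFactorAdditon
-- ===== SOURCE A (Python) =====
-- def NonFactorAdditon(ino):
--     iSumF = 0;
--     iSumNF = 0;
--     for i in range(1,ino):
--         if ((ino % i)!=0):
--             iSumNF = iSumNF + i;
--
--         else:
--             iSumF = iSumF + i;
--
--     return iSumF - iSumNF;
-- ===== SOURCE B (Python) =====
-- def NonFactorAdditon(ino):
--     # O(sqrt(n)) divisor pairing: sum of factors below ino, closed-form total of 1..ino-1
--     if ino <= 1:
--         return 0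
--     s = 0
--     d = 1
--     while d * d <= ino:
--         if ino % d == 0:
--             e = ino // d
--             s += d
--             if e != d:
--                 s += e
--         d += 1
--     s -= ino  # drop ino itself: A only sums factors strictly below ino
--     return 2 * s - ino * (ino - 1) // 2
-- ===== Notes on version B (the rewrite author's own statement) =====
-- stated objective: faster
-- what changed: Replaces the O(n) scan over 1..n-1 by an O(sqrt(n)) divisor-pairing loop plus the closed form n(n-1)/2 for the total, using answer = 2*sumFactors - total.
import Mathlib
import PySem

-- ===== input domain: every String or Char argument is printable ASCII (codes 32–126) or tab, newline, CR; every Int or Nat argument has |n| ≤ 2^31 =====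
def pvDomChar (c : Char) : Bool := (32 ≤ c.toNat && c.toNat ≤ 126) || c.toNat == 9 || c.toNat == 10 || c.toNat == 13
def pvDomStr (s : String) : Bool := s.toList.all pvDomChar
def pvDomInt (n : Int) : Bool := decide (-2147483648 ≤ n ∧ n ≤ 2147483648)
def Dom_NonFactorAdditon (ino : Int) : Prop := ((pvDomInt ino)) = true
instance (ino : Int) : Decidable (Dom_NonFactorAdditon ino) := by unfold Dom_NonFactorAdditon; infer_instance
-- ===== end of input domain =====

-- B replaces A's O(n) scan by an O(√n) divisor-pairing loop plus the closed form n(n-1)/2.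

-- ===== PORT A =====
def NonFactorAdditon (ino : Int) : Int :=
  let st := (PySem.List.pyRange 1 ino 1).foldl
    (fun (p : Int × Int) i =>
      if PySem.Int.mod ino i ≠ 0 then (p.1, p.2 + i) else (p.1 + i, p.2))
    (0, 0)
  st.1 - st.2

-- ===== PORT B =====
-- the `while d*d <= ino` loop of Source B (d is always ≥ 1 and bounded by ino, hence a Nat counter)
def pvBLoop (ino : Int) (d : Nat) (s : Int) : Int :=
  if h : (d : Int) * (d : Int) ≤ ino then
    let s' :=
      if PySem.Int.mod ino (d : Int) = 0 then
        let e := PySem.Int.floordiv ino (d : Int)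
        if e ≠ (d : Int) then s + (d : Int) + e else s + (d : Int)
      else s
    pvBLoop ino (d + 1) s'
  else s
termination_by ino.toNat + 1 - d
decreasing_by
  rcases Nat.eq_zero_or_pos d with h0 | h1
  · subst h0; simp at h; omega
  · have hd : (d : Int) ≤ ino := le_trans (by nlinarith [Int.ofNat_le.mpr h1]) h
    omega

def NonFactorAdditon_alt (ino : Int) : Int :=
  if ino ≤ 1 then 0
  else
    let s := pvBLoop ino 1 0 - ino
    2 * s - PySem.Int.floordiv (ino * (ino - 1)) 2

-- ===== PRECONDITION & SPEC =====
def Spec_NonFactorAdditon (ino : Int) (out : Int) : Prop := out = NonFactorAdditon_alt ino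
instance (ino : Int) (out : Int) : Decidable (Spec_NonFactorAdditon ino out) := by unfold Spec_NonFactorAdditon; infer_instance

-- ===== CLAIM (what is proved, stated in full; the proofs are below) =====
def Claim_equal_NonFactorAdditon : Prop := ∀ (ino : Int), Dom_NonFactorAdditon ino → Spec_NonFactorAdditon ino (NonFactorAdditon ino)

-- ===== LEMMAS AND PROOFS =====

-- A's fold, in closed form: signed sum over the traversed list
lemma pvFoldA (ino : Int) (l : List Int) (a b : Int) :
    (l.foldl
      (fun (p : Int × Int) i =>
        if PySem.Int.mod ino i ≠ 0 then (p.1, p.2 + i) else (p.1 + i, p.2))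
      (a, b)).1 -
    (l.foldl
      (fun (p : Int × Int) i =>
        if PySem.Int.mod ino i ≠ 0 then (p.1, p.2 + i) else (p.1 + i, p.2))
      (a, b)).2 =
    a - b + (l.map (fun i => if PySem.Int.mod ino i = 0 then i else -i)).sum := by
  induction l generalizing a b with
  | nil => simp
  | cons x xs ih =>
      rw [List.foldl_cons, List.map_cons, List.sum_cons]
      by_cases hx : PySem.Int.mod ino x = 0
      · rw [if_neg (by simp [hx]), ih, if_pos hx]; ring
      · rw [if_pos hx, ih, if_neg hx]; ring

-- past the loop bound, every divisor has been collected
lemma pvMin_lt_of_done (n d e : ℕ) (he : e ∈ n.divisors) (h : n < d * d) :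
    min e (n / e) < d := by
  have hdvd := (Nat.mem_divisors.mp he).1
  have hmul : n / e * e = n := Nat.div_mul_cancel hdvd
  have h1 : min e (n / e) * min e (n / e) ≤ n := by
    calc min e (n / e) * min e (n / e) ≤ n / e * e :=
          Nat.mul_le_mul (min_le_right _ _) (min_le_left _ _)
      _ = n := hmul
  by_contra hlt
  push_neg at hlt
  exact absurd (Nat.mul_le_mul hlt hlt) (by omega)

-- one loop step extends the collected-divisors filter by {d, n/d} (when d divides n)
lemma pvFilter_step (n d : ℕ) (hn : 1 ≤ n) (hd : 1 ≤ d) (hdd : d * d ≤ n) :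
    (∑ e ∈ n.divisors.filter (fun e => min e (n / e) < d + 1), (e : Int)) =
    (∑ e ∈ n.divisors.filter (fun e => min e (n / e) < d), (e : Int)) +
    (if d ∣ n then (if n / d = d then (d : Int) else (d : Int) + ((n / d : ℕ) : Int)) else 0) := by
  have hdle : d ≤ n / d := (Nat.le_div_iff_mul_le (by omega)).mpr hdd
  have hcong : n.divisors.filter (fun e => min e (n / e) < d + 1) =
      n.divisors.filter (fun e => min e (n / e) < d ∨ min e (n / e) = d) := by
    apply Finset.filter_congr; intro e _; simp; omega
  rw [hcong, Finset.filter_or, Finset.sum_union]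
  · congr 1
    by_cases hdvd : d ∣ n
    · have hne : n ≠ 0 := by omega
      have hset : n.divisors.filter (fun e => min e (n / e) = d) =
          (if n / d = d then ({d} : Finset ℕ) else {d, n / d}) := by
        ext e
        constructor
        · intro hmem
          rcases Finset.mem_filter.mp hmem with ⟨hediv, hmin⟩
          have hedvd := (Nat.mem_divisors.mp hediv).1
          rcases min_cases e (n / e) with ⟨hcase, _⟩ | ⟨hcase, _⟩
          · -- e = d
            have : e = d := by omega
            subst this
            split_ifs <;> simp
          · -- n / e = d, so e = n / d
            have hnd : n / e = d := by omega
            have : e = n / d := by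
              rw [← hnd, Nat.div_div_self hedvd hne]
            subst this
            split_ifs with hx
            · simp [hx]
            · simp
        · intro hmem
          apply Finset.mem_filter.mpr
          have hddmem : d ∈ n.divisors := Nat.mem_divisors.mpr ⟨hdvd, hne⟩
          have hndmem : n / d ∈ n.divisors :=
            Nat.mem_divisors.mpr ⟨Nat.div_dvd_of_dvd hdvd, hne⟩
          have hdds : n / (n / d) = d := Nat.div_div_self hdvd hne
          split_ifs at hmem with hx
          · rcases Finset.mem_singleton.mp hmem with rfl
            exact ⟨hddmem, by omega⟩
          · rcases Finset.mem_insert.mp hmem with rfl | hmem2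
            · exact ⟨hddmem, by omega⟩
            · rcases Finset.mem_singleton.mp hmem2 with rfl
              refine ⟨hndmem, ?_⟩
              rw [hdds]; omega
      rw [hset, if_pos hdvd]
      split_ifs with hx
      · simp
      · rw [Finset.sum_pair (by omega)]
    · rw [if_neg hdvd]
      apply Finset.sum_eq_zero
      intro e hmem
      exfalso
      rcases Finset.mem_filter.mp hmem with ⟨hediv, hmin⟩
      have hedvd := (Nat.mem_divisors.mp hediv).1
      have hne : n ≠ 0 := by omega
      rcases min_cases e (n / e) with ⟨hcase, _⟩ | ⟨hcase, _⟩
      · exact hdvd (by rw [← show e = d by omega]; exact hedvd)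
      · have hnd : n / e = d := by omega
        exact hdvd (hnd ▸ Nat.div_dvd_of_dvd hedvd)
  · rw [Finset.disjoint_left]
    intro e h1 h2
    have := (Finset.mem_filter.mp h1).2
    have := (Finset.mem_filter.mp h2).2
    omega

-- the B-loop invariant: s already holds the divisors e with min e (n/e) < d
lemma pvBLoop_inv (n : ℕ) (hn : 1 ≤ n) :
    ∀ k d, n + 1 - d ≤ k → 1 ≤ d →
    pvBLoop (n : Int) d
      (∑ e ∈ n.divisors.filter (fun e => min e (n / e) < d), (e : Int)) =
    ∑ e ∈ n.divisors, (e : Int) := by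
  intro k
  induction k with
  | zero =>
      intro d hk hd
      have hdd : ¬ ((d : Int) * (d : Int) ≤ (n : Int)) := by
        have : n < d := by omega
        push_cast
        nlinarith [Int.ofNat_le.mpr hd]
      rw [pvBLoop, dif_neg hdd]
      congr 1
      apply Finset.filter_true_of_mem
      intro e he
      have hnd : n < d := by omega
      exact pvMin_lt_of_done n d e he (lt_of_lt_of_le hnd (Nat.le_mul_of_pos_left d hd))
  | succ k ih =>
      intro d hk hd
      by_cases hdd : (d : Int) * (d : Int) ≤ (n : Int)
      · have hddn : d * d ≤ n := by exact_mod_cast hdd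
        have hdn : d ≤ n := le_trans (Nat.le_mul_of_pos_left d hd) hddn
        rw [pvBLoop, dif_pos hdd]
        have hstep := pvFilter_step n d hn hd hddn
        by_cases hdvd : d ∣ n
        · have hmod : PySem.Int.mod (n : Int) (d : Int) = 0 := by
            have h0 : n % d = 0 := (Nat.dvd_iff_mod_eq_zero).mp hdvd
            rw [PySem.Int.mod_natCast, h0]; simp
          have hfd : PySem.Int.floordiv (n : Int) (d : Int) = ((n / d : ℕ) : Int) :=
            PySem.Int.floordiv_natCast n d
          rw [if_pos hmod]
          simp only [hfd]
          by_cases hx : ((n / d : ℕ) : Int) ≠ (d : Int)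
          · rw [if_pos hx]
            have hxx : n / d ≠ d := fun h => hx (by rw [h])
            have := ih (d + 1) (by omega) (by omega)
            rw [← this]
            congr 1
            rw [hstep, if_pos hdvd, if_neg hxx]
            push_cast; ring
          · rw [if_neg hx]
            push_neg at hx
            have hxx : n / d = d := by exact_mod_cast hx
            have := ih (d + 1) (by omega) (by omega)
            rw [← this]
            congr 1
            rw [hstep, if_pos hdvd, if_pos hxx]
        · have hmod : ¬ PySem.Int.mod (n : Int) (d : Int) = 0 := by
            rw [PySem.Int.mod_natCast]
            intro hcontr
            have : n % d = 0 := by exact_mod_cast hcontr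
            exact hdvd (Nat.dvd_of_mod_eq_zero this)
          rw [if_neg hmod]
          have := ih (d + 1) (by omega) (by omega)
          rw [← this]
          congr 1
          rw [hstep, if_neg hdvd]
          ring
      · rw [pvBLoop, dif_neg hdd]
        congr 1
        apply Finset.filter_true_of_mem
        intro e he
        apply pvMin_lt_of_done n d e he
        by_contra hcontr
        push_neg at hcontr
        exact hdd (by exact_mod_cast hcontr)

lemma pvBLoop_sum (n : ℕ) (hn : 1 ≤ n) :
    pvBLoop (n : Int) 1 0 = ∑ e ∈ n.divisors, (e : Int) := by
  have h := pvBLoop_inv n hn n 1 (by omega) (by omega)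
  have hf : n.divisors.filter (fun e => min e (n / e) < 1) = ∅ := by
    apply Finset.filter_false_of_mem
    intro e he
    have h1 := Nat.one_le_iff_ne_zero.mpr (Nat.pos_of_mem_divisors he).ne'
    have hdvd := (Nat.mem_divisors.mp he).1
    have h2 : 1 ≤ n / e := Nat.one_le_div_iff (Nat.pos_of_mem_divisors he) |>.mpr
      (Nat.le_of_dvd (by omega) hdvd)
    omega
  rw [hf] at h
  simpa using h

-- sum of factors of n below n, as a divisor sum
lemma pvF_eq (n : ℕ) (hn : 2 ≤ n) :
    (∑ i ∈ Finset.Ico 1 n, (if n % i = 0 then (i : Int) else 0)) =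
    (∑ e ∈ n.divisors, (e : Int)) - n := by
  have h1 : n.divisors = Finset.filter (fun i => i ∣ n) (Finset.Ico 1 (n + 1)) := rfl
  have h2 : ∀ i ∈ Finset.Ico 1 n,
      (if n % i = 0 then (i : Int) else 0) = (if i ∣ n then (i : Int) else 0) := by
    intro i hi
    rcases Finset.mem_Ico.mp hi with ⟨hi1, _⟩
    simp [Nat.dvd_iff_mod_eq_zero]
  rw [h1, Finset.sum_filter, Finset.sum_Ico_succ_top (by omega : 1 ≤ n), if_pos (dvd_refl n),
    Finset.sum_congr rfl h2]
  ring

-- Gauss: twice the sum 1..n-1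
lemma pvT_eq (n : ℕ) :
    2 * (∑ i ∈ Finset.Ico 1 n, (i : Int)) = (n : Int) * ((n : Int) - 1) := by
  induction n with
  | zero => simp
  | succ m ih =>
      rcases Nat.eq_zero_or_pos m with rfl | hm
      · simp
      · rw [Finset.sum_Ico_succ_top hm, mul_add, ih]; push_cast; ring

lemma pvSum_map_range (f : ℕ → Int) (m : ℕ) :
    ((List.range m).map f).sum = ∑ k ∈ Finset.range m, f k := by
  induction m with
  | zero => simp
  | succ m ih => rw [List.range_succ, Finset.sum_range_succ]; simp [ih]

-- A's value in closed form: 2·(sum of factors below n) − (sum of 1..n-1)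
lemma pvA_eq (n : ℕ) (hn : 2 ≤ n) :
    NonFactorAdditon (n : Int) =
    2 * (∑ i ∈ Finset.Ico 1 n, (if n % i = 0 then (i : Int) else 0)) -
      (∑ i ∈ Finset.Ico 1 n, (i : Int)) := by
  unfold NonFactorAdditon
  rw [pvFoldA, PySem.List.pyRange_one]
  have ht : ((n : Int) - 1).toNat = n - 1 := by omega
  rw [ht, List.map_map, pvSum_map_range, Finset.sum_Ico_eq_sum_range,
    Finset.sum_Ico_eq_sum_range, Finset.mul_sum, ← Finset.sum_sub_distrib]
  rw [zero_sub, neg_zero, zero_add]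
  apply Finset.sum_congr rfl
  intro k hk
  simp only [Function.comp]
  have hc : (1 : Int) + (k : Int) = ((1 + k : ℕ) : Int) := by push_cast; ring
  rw [hc, PySem.Int.mod_natCast]
  by_cases hm : n % (1 + k) = 0
  · rw [hm]
    norm_num
    ring
  · rw [if_neg (by exact_mod_cast hm), if_neg hm]
    push_cast; ring

-- B's value in closed form
lemma pvB_eq (n : ℕ) (hn : 2 ≤ n) :
    NonFactorAdditon_alt (n : Int) =
    2 * ((∑ e ∈ n.divisors, (e : Int)) - n) - (∑ i ∈ Finset.Ico 1 n, (i : Int)) := by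
  unfold NonFactorAdditon_alt
  rw [if_neg (by exact_mod_cast by omega : ¬ (n : Int) ≤ 1)]
  rw [pvBLoop_sum n (by omega)]
  have h2T := pvT_eq n
  have hT : (n : Int) * ((n : Int) - 1) = 2 * (∑ i ∈ Finset.Ico 1 n, (i : Int)) := h2T.symm
  rw [hT, PySem.Int.floordiv_eq_ediv_of_pos (by norm_num),
    Int.mul_ediv_cancel_left _ (by norm_num)]

-- ===== VERDICT (by name: the statement is the Claim_ definition above) =====
theorem NonFactorAdditon_spec : Claim_equal_NonFactorAdditon := by
  intro ino _
  unfold Spec_NonFactorAdditon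
  by_cases h1 : ino ≤ 1
  · simp [NonFactorAdditon, NonFactorAdditon_alt, PySem.List.pyRange_one_eq_nil h1, h1]
  · obtain ⟨n, rfl⟩ : ∃ n : ℕ, ino = (n : Int) :=
      ⟨ino.toNat, (Int.toNat_of_nonneg (by omega)).symm⟩
    have hn : 2 ≤ n := by exact_mod_cast (by omega : (2 : Int) ≤ (n : Int))
    rw [pvA_eq n hn, pvB_eq n hn, pvF_eq n hn]
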